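-- pv_equiv track=rewrite | github.com/pypi-data/pypi-mirror-375 | packages/flavorpack/flavorpack-0.0.4.post8-py311-none-manylinux2014_x86_64.whl/flavor/psp/format_2025/operations.py | pack_operations
-- ===== SOURCE A (Python) =====
-- def pack_operations(operations: list[int]) -> int:
--     """
--     Pack a list of operations into a 64-bit integer.
--
--     Each operation takes 8 bits, allowing up to 8 operations in the chain.
--     Operations are packed in execution order (first operation in LSB).
--
--     Args:
--         operations: List of operation constants (max 8)
--
--     Returns:
--         Packed 64-bit integer
--
--     Example:
--         >>> pack_operations([OP_TAR, OP_GZIP])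
--         0x1001  # 0x01 | (0x10 << 8)
--     """
--     if len(operations) > 8:
--         raise ValueError(f"Maximum 8 operations allowed, got {len(operations)}")
--
--     packed = 0
--     for i, op in enumerate(operations):
--         if op < 0 or op > 255:
--             raise ValueError(f"Operation {op} out of range (0-255)")
--         packed |= (op & 0xFF) << (i * 8)
--
--     return packed
-- ===== SOURCE B (Python) =====
-- def pack_operations(operations: list[int]) -> int:
--     if len(operations) > 8:
--         raise ValueError(f"Maximum 8 operations allowed, got {len(operations)}")
--     for op in operations:
--         if op < 0 or op > 255:
--             raise ValueError(f"Operation {op} out of range (0-255)")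
--     return int.from_bytes(bytes(operations), 'little')
-- ===== Notes on version B (the rewrite author's own statement) =====
-- stated objective: idiomatic
-- what changed: B replaces A's enumerate-indexed OR/shift accumulator with a separate validation pass followed by little-endian byte packing via int.from_bytes(bytes(operations), 'little'); Pre_ excludes the inputs where both raise ValueError (more than 8 operations, or an operation outside 0-255).
import Mathlib
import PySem

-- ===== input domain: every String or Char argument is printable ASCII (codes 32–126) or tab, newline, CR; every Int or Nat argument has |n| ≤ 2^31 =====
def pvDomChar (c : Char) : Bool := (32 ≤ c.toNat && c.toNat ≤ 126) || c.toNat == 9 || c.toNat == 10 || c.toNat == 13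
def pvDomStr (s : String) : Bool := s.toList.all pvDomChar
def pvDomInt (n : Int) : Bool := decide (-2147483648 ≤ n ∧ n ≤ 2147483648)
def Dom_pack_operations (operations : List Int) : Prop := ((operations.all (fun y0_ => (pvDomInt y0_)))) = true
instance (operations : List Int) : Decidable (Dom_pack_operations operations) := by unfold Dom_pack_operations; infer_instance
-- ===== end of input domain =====

-- B validates each operation in one plain pass and then packs via little-endian
-- byte accumulation (Python's int.from_bytes(bytes(ops),'little')) instead of A's
-- index-tracked OR/shift accumulator; objective: more idiomatic, same cost.


-- ===== PORT A =====
-- A's for-loop `for i, op in enumerate(operations): packed |= (op & 0xFF) << (i*8)`.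
-- The in-loop `raise ValueError` for op outside 0..255 (and the len > 8 guard) are
-- exceptions, excluded by Pre_pack_operations.
def packA_loop (ops : List Int) (i : Nat) (packed : Int) : Int :=
  match ops with
  | [] => packed
  | op :: rest => packA_loop rest (i + 1) (PySem.Int.bor packed ((PySem.Int.band op 0xFF) <<< (i * 8)))

def pack_operations (operations : List Int) : Int :=
  packA_loop operations 0 0

-- ===== PORT B =====
-- B's `int.from_bytes(bytes(operations), 'little')`: little-endian byte accumulation.
-- B's validation pass raises exactly where A does; those inputs are outside Pre_.
def fromBytesLE (ops : List Int) : Int :=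
  match ops with
  | [] => 0
  | op :: rest => op + 256 * fromBytesLE rest

def pack_operations_alt (operations : List Int) : Int :=
  fromBytesLE operations

-- ===== PRECONDITION & SPEC =====
-- Pre_ excludes exactly the inputs on which A (and B) raise ValueError:
-- more than 8 operations, or any operation outside 0..255.
def Pre_pack_operations (operations : List Int) : Prop :=
  operations.length ≤ 8 ∧ ∀ op ∈ operations, 0 ≤ op ∧ op ≤ 255

instance (operations : List Int) : Decidable (Pre_pack_operations operations) := by
  unfold Pre_pack_operations; infer_instance

def pvWitness_pack_operations : List Int := [1, 16, 255]

def Spec_pack_operations (operations : List Int) (out : Int) : Prop := out = pack_operations_alt operations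
instance (operations : List Int) (out : Int) : Decidable (Spec_pack_operations operations out) := by unfold Spec_pack_operations; infer_instance

-- ===== CLAIM (what is proved, stated in full; the proofs are below) =====
def Claim_equal_pack_operations : Prop := ∀ (operations : List Int), Dom_pack_operations operations → Pre_pack_operations operations → Spec_pack_operations operations (pack_operations operations)

-- ===== LEMMAS AND PROOFS =====

-- Loop invariant: with a nonnegative accumulator whose bits lie below 8*i,
-- A's OR/shift loop adds the little-endian value of the remaining bytes at weight 2^(8*i).
theorem packA_loop_eq (ops : List Int) : ∀ (i : Nat) (acc : Nat),
    acc < 2 ^ (8 * i) → (∀ op ∈ ops, 0 ≤ op ∧ op ≤ 255) →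
    packA_loop ops i (↑acc) = ↑acc + 2 ^ (8 * i) * fromBytesLE ops := by
  induction ops with
  | nil => intro i acc _ _; simp [packA_loop, fromBytesLE]
  | cons op rest ih =>
    intro i acc hacc hall
    have hop := hall op (List.mem_cons_self ..)
    have hrest : ∀ x ∈ rest, 0 ≤ x ∧ x ≤ 255 := fun x hx => hall x (List.mem_cons_of_mem _ hx)
    -- the operation as a Nat
    have hopn : (op.toNat : Int) = op := Int.toNat_of_nonneg hop.1
    have hoplt : op.toNat < 256 := by omega
    -- (op & 0xFF) = op, as Nats
    have hband : PySem.Int.band op 0xFF = ((op.toNat &&& 255 : Nat) : Int) := by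
      rw [← hopn]; exact PySem.Int.band_natCast op.toNat 255
    have hmask : op.toNat &&& 255 = op.toNat := by
      have : (255 : Nat) = 2 ^ 8 - 1 := by norm_num
      rw [this]; exact Nat.and_two_pow_sub_one_of_lt_two_pow hoplt
    -- the ORed value, as a single Nat
    have hshift : (((op.toNat : Nat) : Int) <<< (i * 8)) = ((op.toNat <<< (i * 8) : Nat) : Int) := rfl
    have hor : PySem.Int.bor (↑acc) ((op.toNat <<< (i * 8) : Nat) : Int)
        = ((acc ||| op.toNat <<< (i * 8) : Nat) : Int) :=
      PySem.Int.bor_natCast acc (op.toNat <<< (i * 8))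
    have hmuli : 8 * i = i * 8 := Nat.mul_comm 8 i
    have hadd : op.toNat <<< (i * 8) + acc = op.toNat <<< (i * 8) ||| acc :=
      Nat.shiftLeft_add_eq_or_of_lt (by rw [← hmuli]; exact hacc) op.toNat
    -- new accumulator
    have hsl : op.toNat <<< (i * 8) = op.toNat * 2 ^ (8 * i) := by
      rw [Nat.shiftLeft_eq, hmuli]
    have hacc' : acc + op.toNat * 2 ^ (8 * i) < 2 ^ (8 * (i + 1)) := by
      have hp : 0 < 2 ^ (8 * i) := Nat.two_pow_pos (8 * i)
      calc acc + op.toNat * 2 ^ (8 * i) < 2 ^ (8 * i) + 255 * 2 ^ (8 * i) := by nlinarith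
        _ = 2 ^ (8 * i) * 2 ^ 8 := by ring
        _ = 2 ^ (8 * i + 8) := by rw [pow_add]
        _ = 2 ^ (8 * (i + 1)) := by ring_nf
    have ihstep := ih (i + 1) (acc + op.toNat * 2 ^ (8 * i)) hacc' hrest
    -- assemble
    simp only [packA_loop, fromBytesLE]
    rw [hband, hmask, hshift, hor, Nat.or_comm, ← hadd, hsl]
    have : ((op.toNat * 2 ^ (8 * i) + acc : Nat) : Int)
        = ((acc + op.toNat * 2 ^ (8 * i) : Nat) : Int) := by
      push_cast; ring
    rw [this, ihstep]
    have h2 : (2 : Int) ^ (8 * (i + 1)) = 2 ^ (8 * i) * 256 := by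
      rw [Nat.mul_add, pow_add]; norm_num
    push_cast
    rw [h2, hopn]
    ring

-- ===== VERDICT (by name: the statement is the Claim_ definition above) =====
theorem pack_operations_spec : Claim_equal_pack_operations := by
  intro operations _ hpre
  unfold Spec_pack_operations pack_operations pack_operations_alt
  have := packA_loop_eq operations 0 0 (by norm_num) hpre.2
  simpa using this
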